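-- pv_equiv track=rewrite | github.com/Sajesh1234/Intro-To-Natural-Language-Processing | pa2/ngram.py | numerator
-- ===== SOURCE A (Python) =====
-- def listToString(s):
--     str1 = " "
--     return str1.join(s)
--
-- def numerator(ngrams, n):
--     freq_dist = {}
--
--     for i in range(0, len(ngrams)):
--         word = str(ngrams[i].split()[n - 1])
--         #h is the context for the words, so previous words.
--         h = listToString(ngrams[i].split()[:(n - 1)])
--         # Increase frequence of h if h already exists.
--         if h in freq_dist:
--             if word in freq_dist[h]:
--                 freq_dist[h][word] += 1
--             else:
--                 freq_dist[h][word] = {}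
--                 freq_dist[h][word] = 1
--
--         # If h does not exist, initialize it and set to 1
--         else:
--             freq_dist[h] = {}
--             freq_dist[h][word] = {}
--             freq_dist[h][word] = 1
--
--     return freq_dist
-- ===== SOURCE B (Python) =====
-- def numerator(ngrams, n):
--     # Pass 1: flat count of (context, word) pairs.
--     pair_counts = {}
--     for g in ngrams:
--         toks = g.split()
--         key = (" ".join(toks[:n - 1]), toks[n - 1])
--         pair_counts[key] = pair_counts.get(key, 0) + 1
--     # Pass 2: regroup the flat counts into the nested dict.
--     freq_dist = {}
--     for (h, w), c in pair_counts.items():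
--         freq_dist.setdefault(h, {})[w] = c
--     return freq_dist
-- ===== Notes on version B (the rewrite author's own statement) =====
-- stated objective: alternative
-- what changed: A builds the nested context->word->count dict incrementally with a three-way branch per ngram; B first counts flat (context, word) pairs in one dict and then regroups those counts into the nested dict in a second pass.
import Mathlib
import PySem

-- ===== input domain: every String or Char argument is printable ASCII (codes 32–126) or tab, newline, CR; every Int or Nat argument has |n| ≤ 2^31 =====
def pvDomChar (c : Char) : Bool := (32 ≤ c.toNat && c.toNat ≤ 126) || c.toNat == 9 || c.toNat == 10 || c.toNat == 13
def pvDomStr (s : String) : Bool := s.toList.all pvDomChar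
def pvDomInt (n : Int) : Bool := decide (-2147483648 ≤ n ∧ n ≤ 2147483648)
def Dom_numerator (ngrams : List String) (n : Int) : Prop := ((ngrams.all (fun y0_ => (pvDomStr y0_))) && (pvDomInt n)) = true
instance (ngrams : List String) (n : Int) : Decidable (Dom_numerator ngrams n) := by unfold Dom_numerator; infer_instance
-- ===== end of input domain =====

-- B replaces A's incremental nested-dict update by a flat (context, word) pair-count pass
-- followed by a regrouping pass (alternative decomposition, same cost).


-- ===== PORT A =====
-- listToString(s) = " ".join(s)
def listToString (s : List String) : String := PySem.Str.join " " s

-- the body of A's for-loop, acting on the current nested dict and ngrams[i];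
-- toks[n-1] is read with pyGetD (default ""): Pre_numerator guarantees the index is
-- in range, exactly where Python does not raise IndexError.
def numStep (n : Int) (fd : PySem.Dict String (PySem.Dict String Int)) (g : String) :
    PySem.Dict String (PySem.Dict String Int) :=
  let word := PySem.List.pyGetD (PySem.Str.split₀ g) (n - 1) ""
  let h := listToString (PySem.List.slice (PySem.Str.split₀ g) none (some (n - 1)))
  match fd.get? h with
  | some inner =>
    match inner.get? word with
    | some c => fd.insert h (inner.insert word (c + 1))
    | none   => fd.insert h (inner.insert word 1)
  | none => fd.insert h ((PySem.Dict.empty).insert word 1)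

-- Literal port of A: for i in range(0, len(ngrams)), update freq_dist, return it.
def numerator (ngrams : List String) (n : Int) : List (String × List (String × Int)) :=
  ((PySem.List.pyRange 0 (PySem.List.len ngrams)).foldl
      (fun fd i => numStep n fd (PySem.List.pyGetD ngrams i "")) PySem.Dict.empty).items.map
    (fun p => (p.1, p.2.items))

-- ===== PORT B =====
-- the body of Source B's first loop: count the (context, word) pair of one ngram
def pairStep (n : Int) (d : PySem.Dict (String × String) Int) (g : String) :
    PySem.Dict (String × String) Int :=
  let toks := PySem.Str.split₀ g
  let key := (PySem.Str.join " " (PySem.List.slice toks none (some (n - 1))),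
              PySem.List.pyGetD toks (n - 1) "")
  d.insert key (d.getD key 0 + 1)

-- Pass 1 of Source B: flat dict counting (context, word) pairs.
def pairCounts (ngrams : List String) (n : Int) : PySem.Dict (String × String) Int :=
  ngrams.foldl (pairStep n) PySem.Dict.empty

-- Pass 2 of Source B: regroup the flat counts into the nested dict
-- (freq_dist.setdefault(h, {})[w] = c).
def regroup (items : List ((String × String) × Int)) : PySem.Dict String (PySem.Dict String Int) :=
  items.foldl (fun fd p =>
    fd.insert p.1.1 ((fd.getD p.1.1 PySem.Dict.empty).insert p.1.2 p.2)) PySem.Dict.empty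

def numerator_alt (ngrams : List String) (n : Int) : List (String × List (String × Int)) :=
  (regroup (pairCounts ngrams n).items).items.map (fun p => (p.1, p.2.items))

-- ===== PRECONDITION & SPEC =====
-- Pre_ excludes exactly the inputs where A raises IndexError: some ngram's split() has no
-- element at Python index n-1.
def Pre_numerator (ngrams : List String) (n : Int) : Prop :=
  ∀ g ∈ ngrams, PySem.Raise.InRange (PySem.Str.split₀ g).length (n - 1)
instance (ngrams : List String) (n : Int) : Decidable (Pre_numerator ngrams n) := by unfold Pre_numerator; infer_instance

def pvWitness_numerator : List String × Int := (["a b", "a c", "a b"], 2)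

def Spec_numerator (ngrams : List String) (n : Int) (out : List (String × List (String × Int))) : Prop := out = numerator_alt ngrams n
instance (ngrams : List String) (n : Int) (out : List (String × List (String × Int))) : Decidable (Spec_numerator ngrams n out) := by unfold Spec_numerator; infer_instance

-- ===== CLAIM (what is proved, stated in full; the proofs are below) =====
def Claim_equal_numerator : Prop := ∀ (ngrams : List String) (n : Int), Dom_numerator ngrams n → Pre_numerator ngrams n → Spec_numerator ngrams n (numerator ngrams n)

-- ===== LEMMAS AND PROOFS =====

-- the (context, word) key one ngram contributes
def keyOf (n : Int) (g : String) : String × String :=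
  (PySem.Str.join " " (PySem.List.slice (PySem.Str.split₀ g) none (some (n - 1))),
   PySem.List.pyGetD (PySem.Str.split₀ g) (n - 1) "")

-- A's loop body in normalized getD form, keyed by the (context, word) pair
def stepN (fd : PySem.Dict String (PySem.Dict String Int)) (k : String × String) :
    PySem.Dict String (PySem.Dict String Int) :=
  fd.insert k.1 ((fd.getD k.1 PySem.Dict.empty).insert k.2
    ((fd.getD k.1 PySem.Dict.empty).getD k.2 0 + 1))

theorem numStep_eq_stepN (n : Int) (fd : PySem.Dict String (PySem.Dict String Int)) (g : String) :
    numStep n fd g = stepN fd (keyOf n g) := by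
  unfold numStep stepN keyOf listToString
  cases h1 : fd.get? (PySem.Str.join " " (PySem.List.slice (PySem.Str.split₀ g) none (some (n - 1)))) with
  | none => simp [PySem.Dict.getD_eq_get?_getD, h1]
  | some inner =>
    cases h2 : inner.get? (PySem.List.pyGetD (PySem.Str.split₀ g) (n - 1) "") with
    | none => simp [PySem.Dict.getD_eq_get?_getD, h1, h2]
    | some c => simp [PySem.Dict.getD_eq_get?_getD, h1, h2]

theorem regroup_append_singleton (L : List ((String × String) × Int)) (p : (String × String) × Int) :
    regroup (L ++ [p]) =
      (regroup L).insert p.1.1 (((regroup L).getD p.1.1 PySem.Dict.empty).insert p.1.2 p.2) := by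
  simp [regroup, List.foldl_append]

-- two inserts at distinct keys commute when the first key is already present
theorem insert_comm_of_contains {κ ν : Type} [BEq κ] [LawfulBEq κ] (d : PySem.Dict κ ν)
    {k k' : κ} (a b : ν) (hc : d.contains k = true) (hne : k' ≠ k) :
    (d.insert k a).insert k' b = (d.insert k' b).insert k a := by
  cases hck' : d.contains k' with
  | true =>
    apply PySem.Dict.ext
    rw [PySem.Dict.items_insert_of_contains _ b
          (by rw [PySem.Dict.contains_insert]; simp [hck']),
        PySem.Dict.items_insert_of_contains _ a hc,
        PySem.Dict.items_insert_of_contains _ a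
          (by rw [PySem.Dict.contains_insert]; simp [hc]),
        PySem.Dict.items_insert_of_contains _ b hck']
    simp only [List.map_map]
    apply List.map_congr_left
    intro p _
    by_cases h1 : p.1 = k <;> by_cases h2 : p.1 = k' <;>
      simp [h1, h2, hne, Ne.symm hne]
  | false =>
    apply PySem.Dict.ext
    rw [PySem.Dict.items_insert_of_not_contains _ b
          (by rw [PySem.Dict.contains_insert]; simp [hck', hne]),
        PySem.Dict.items_insert_of_contains _ a hc,
        PySem.Dict.items_insert_of_contains _ a
          (by rw [PySem.Dict.contains_insert]; simp [hc]),
        PySem.Dict.items_insert_of_not_contains _ b hck',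
        List.map_append]
    simp [hne]

theorem get?_mk_append {κ ν : Type} [BEq κ] (L : List (κ × ν)) (a : κ) (b : ν) (x : κ) :
    (PySem.Dict.mk (L ++ [(a, b)])).get? x =
      (match (PySem.Dict.mk L).get? x with
       | some v => some v
       | none => if a == x then some b else none) := by
  induction L with
  | nil =>
    have h0 : (PySem.Dict.mk ([] : List (κ × ν))).get? x = none := rfl
    rw [show ([] : List (κ × ν)) ++ [(a, b)] = [(a, b)] from rfl, PySem.Dict.get?_mk_cons, h0]
  | cons q L ih =>
    obtain ⟨qk, qv⟩ := q
    rw [List.cons_append, PySem.Dict.get?_mk_cons, PySem.Dict.get?_mk_cons, ih]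
    cases h : qk == x <;> simp

theorem mem_keys_regroup {L : List ((String × String) × Int)} {x : String}
    (hx : x ∈ L.map (fun p => p.1.1)) : x ∈ (regroup L).keys := by
  induction L using List.reverseRecOn with
  | nil => simp at hx
  | append_singleton L p ih =>
    rw [regroup_append_singleton]
    rw [List.map_append, List.mem_append] at hx
    rcases hx with hx | hx
    · exact (PySem.Dict.mem_keys_insert _ _ _ _).mpr (Or.inr (ih hx))
    · simp at hx
      exact (PySem.Dict.mem_keys_insert _ _ _ _).mpr (Or.inl hx)

theorem mem_inner_keys_regroup {L : List ((String × String) × Int)} {k : String × String}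
    (hk : k ∈ L.map Prod.fst) : k.2 ∈ ((regroup L).getD k.1 PySem.Dict.empty).keys := by
  induction L using List.reverseRecOn with
  | nil => simp at hk
  | append_singleton L p ih =>
    rw [regroup_append_singleton]
    by_cases h1 : k.1 = p.1.1
    · rw [h1, PySem.Dict.getD_insert_self]
      rw [List.map_append, List.mem_append] at hk
      rcases hk with hk | hk
      · have := ih hk
        rw [h1] at this
        exact (PySem.Dict.mem_keys_insert _ _ _ _).mpr (Or.inr this)
      · simp at hk
        rw [hk]
        exact (PySem.Dict.mem_keys_insert _ _ _ _).mpr (Or.inl rfl)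
    · rw [PySem.Dict.getD_insert_of_ne _ _ _ h1]
      apply ih
      rw [List.map_append, List.mem_append] at hk
      rcases hk with hk | hk
      · exact hk
      · simp at hk
        exact absurd (by rw [hk]) h1

theorem lookup_regroup (L : List ((String × String) × Int))
    (hnd : (L.map Prod.fst).Nodup) (k : String × String) :
    ((regroup L).getD k.1 PySem.Dict.empty).getD k.2 0 = (PySem.Dict.mk L).getD k 0 := by
  induction L using List.reverseRecOn with
  | nil => rfl
  | append_singleton L p ih =>
    rw [List.map_append, List.nodup_append] at hnd
    obtain ⟨hndL, -, hdisj⟩ := hnd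
    have hpL : p.1 ∉ L.map Prod.fst := fun hmem => hdisj p.1 hmem p.1 (by simp) rfl
    obtain ⟨⟨ph, pw⟩, pv⟩ := p
    rw [regroup_append_singleton]
    rw [show (PySem.Dict.mk (L ++ [((ph, pw), pv)])).getD k 0 =
          ((PySem.Dict.mk (L ++ [((ph, pw), pv)])).get? k).getD 0 from
        PySem.Dict.getD_eq_get?_getD _ _ _,
      get?_mk_append]
    simp only at *
    by_cases h1 : k.1 = ph
    · rw [h1, PySem.Dict.getD_insert_self]
      by_cases h2 : k.2 = pw
      · have hk : k = (ph, pw) := Prod.ext h1 h2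
        rw [h2, PySem.Dict.getD_insert_self]
        have h0 : (PySem.Dict.mk L).get? k = none := by
          rw [PySem.Dict.get?_eq_none_iff_not_mem_keys, PySem.Dict.keys_mk]
          rw [hk]; exact hpL
        rw [hk] at h0 ⊢
        simp [h0]
      · rw [PySem.Dict.getD_insert_of_ne _ _ _ h2]
        have hne : ¬((ph, pw) == k) = true := by
          simp
          intro he
          exact h2 (by rw [← he])
        have hih := ih hndL
        rw [show (PySem.Dict.mk L).getD k 0 = ((PySem.Dict.mk L).get? k).getD 0 from
            PySem.Dict.getD_eq_get?_getD _ _ _] at hih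
        rw [h1] at hih
        rw [hih]
        cases hg : (PySem.Dict.mk L).get? k <;> simp [hne]
    · rw [PySem.Dict.getD_insert_of_ne _ _ _ h1]
      have hne : ¬((ph, pw) == k) = true := by
        simp
        intro he
        exact h1 (by rw [← he])
      have hih := ih hndL
      rw [show (PySem.Dict.mk L).getD k 0 = ((PySem.Dict.mk L).get? k).getD 0 from
          PySem.Dict.getD_eq_get?_getD _ _ _] at hih
      rw [hih]
      cases hg : (PySem.Dict.mk L).get? k <;> simp [hne]

theorem regroup_replace (L : List ((String × String) × Int)) (k : String × String) (v : Int)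
    (hnd : (L.map Prod.fst).Nodup) (hk : k ∈ L.map Prod.fst) :
    regroup (L.map (fun p => if p.1 == k then (k, v) else p)) =
      (regroup L).insert k.1 (((regroup L).getD k.1 PySem.Dict.empty).insert k.2 v) := by
  induction L using List.reverseRecOn with
  | nil => simp at hk
  | append_singleton L p ih =>
    rw [List.map_append, List.nodup_append] at hnd
    obtain ⟨hndL, -, hdisj⟩ := hnd
    have hpL : p.1 ∉ L.map Prod.fst := fun hmem => hdisj p.1 hmem p.1 (by simp) rfl
    rw [List.map_append]
    by_cases hp : p.1 = k
    · have hLid : L.map (fun q => if q.1 == k then (k, v) else q) = L := by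
        have hcg : ∀ q ∈ L, (if q.1 == k then (k, v) else q) = q := by
          intro q hq
          have hqk : ¬q.1 = k := fun h => hpL (hp ▸ h ▸ List.mem_map_of_mem hq)
          simp [hqk]
        rw [List.map_congr_left hcg]; exact List.map_id _
      have hmap1 : [p].map (fun q => if q.1 == k then (k, v) else q) = [(k, v)] := by
        simp [hp]
      rw [hLid, hmap1, regroup_append_singleton, regroup_append_singleton]
      subst hp
      rw [PySem.Dict.getD_insert_self, PySem.Dict.insert_insert_self,
          PySem.Dict.insert_insert_self]
    · have hkL : k ∈ L.map Prod.fst := by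
        rw [List.map_append, List.mem_append] at hk
        rcases hk with hk | hk
        · exact hk
        · simp at hk; exact absurd hk.symm hp
      have hmap1 : [p].map (fun q => if q.1 == k then (k, v) else q) = [p] := by
        simp [hp]
      rw [hmap1, regroup_append_singleton, ih hndL hkL, regroup_append_singleton]
      by_cases hh : p.1.1 = k.1
      · have hw : ¬p.1.2 = k.2 := fun h => hp (Prod.ext hh h)
        rw [hh, PySem.Dict.getD_insert_self, PySem.Dict.getD_insert_self,
            PySem.Dict.insert_insert_self, PySem.Dict.insert_insert_self]
        congr 1
        have hcont : ((regroup L).getD k.1 PySem.Dict.empty).contains k.2 = true :=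
          (PySem.Dict.contains_iff_mem_keys _ _).mpr (mem_inner_keys_regroup hkL)
        exact insert_comm_of_contains _ _ _ hcont hw
      · rw [PySem.Dict.getD_insert_of_ne _ _ _ hh,
            PySem.Dict.getD_insert_of_ne _ _ _ (fun h => hh h.symm)]
        have hcont : (regroup L).contains k.1 = true := by
          apply (PySem.Dict.contains_iff_mem_keys _ _).mpr
          apply mem_keys_regroup
          obtain ⟨q, hq, hq1⟩ := List.mem_map.mp hkL
          exact List.mem_map.mpr ⟨q, hq, by rw [hq1]⟩
        exact insert_comm_of_contains _ _ _ hcont hh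

theorem regroup_insert (d : PySem.Dict (String × String) Int) (hnd : d.keys.Nodup)
    (k : String × String) (v : Int) :
    regroup ((d.insert k v).items) =
      (regroup d.items).insert k.1 (((regroup d.items).getD k.1 PySem.Dict.empty).insert k.2 v) := by
  cases hc : d.contains k with
  | false =>
    rw [PySem.Dict.items_insert_of_not_contains _ v hc, regroup_append_singleton]
  | true =>
    rw [PySem.Dict.items_insert_of_contains _ v hc]
    exact regroup_replace d.items k v hnd ((PySem.Dict.contains_iff_mem_keys _ _).mp hc)

theorem regroup_counter (ps : List (String × String)) :
    regroup (PySem.Dict.counter ps).items = ps.foldl stepN PySem.Dict.empty := by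
  induction ps using List.reverseRecOn with
  | nil => rfl
  | append_singleton ps k ih =>
    rw [PySem.Dict.counter_append_singleton, List.foldl_append]
    have hmod : (PySem.Dict.counter ps).modify k 0 (· + 1) =
        (PySem.Dict.counter ps).insert k ((PySem.Dict.counter ps).getD k 0 + 1) := rfl
    rw [hmod, regroup_insert _ (PySem.Dict.nodup_keys_counter ps) k _, ih]
    have hl := lookup_regroup (PySem.Dict.counter ps).items
      (PySem.Dict.nodup_keys_counter ps) k
    rw [ih] at hl
    have hmk : PySem.Dict.mk (PySem.Dict.counter ps).items = PySem.Dict.counter ps := rfl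
    rw [hmk] at hl
    simp only [List.foldl_cons, List.foldl_nil, stepN, hl]

-- ===== VERDICT (by name: the statement is the Claim_ definition above) =====
theorem numerator_spec : Claim_equal_numerator := by
  intro ngrams n _ _
  unfold Spec_numerator numerator numerator_alt pairCounts
  have hA : (PySem.List.pyRange 0 (PySem.List.len ngrams)).foldl
      (fun fd i => numStep n fd (PySem.List.pyGetD ngrams i "")) PySem.Dict.empty =
      ngrams.foldl (numStep n) PySem.Dict.empty := by
    rw [PySem.List.foldl_pyRange_pyGetD ngrams "" (numStep n) PySem.Dict.empty (le_refl 0)]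
    simp
  rw [hA]
  have hAn : ngrams.foldl (numStep n) PySem.Dict.empty =
      (ngrams.map (keyOf n)).foldl stepN PySem.Dict.empty := by
    rw [List.foldl_map]
    exact PySem.List.foldl_congr_mem _ _ _ _ (fun acc x _ => numStep_eq_stepN n acc x)
  have hB : ngrams.foldl (pairStep n) PySem.Dict.empty =
      PySem.Dict.counter (ngrams.map (keyOf n)) := by
    rw [← PySem.Dict.foldl_insert_getD_add_one_eq_counter, List.foldl_map]
    rfl
  rw [hAn, hB, regroup_counter]
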